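-- pv_equiv track=rewrite | github.com/klaudia-nazarko/collaborative-filtering-python | functions.py | short_title
-- ===== SOURCE A (Python) =====
-- def short_title(title, max_len=40):
--     title = str(title).split(' ')
--     short_title = ''
--
--     for i in range(len(title)):
--         if len(short_title) < max_len:
--             short_title = ' '.join([short_title, title[i]])
--     short_title = short_title.strip()
--     return short_title
-- ===== SOURCE B (Python) =====
-- def short_title(title, max_len=40):
--     words = str(title).split(' ')
--     cost = 0  # length the growing string would have: sum of word lengths + one separator per word
--     k = 0
--     for w in words:
--         if cost + k >= max_len:
--             break
--         cost += len(w)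
--         k += 1
--     return ' '.join(words[:k]).strip()
-- ===== Notes on version B (the rewrite author's own statement) =====
-- stated objective: alternative
-- what changed: B replaces A's word-by-word string rebuilding (joining the accumulator with the next word each iteration) with an arithmetic scan that only counts how many leading words fit within the length budget, then joins that prefix once.
import Mathlib
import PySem

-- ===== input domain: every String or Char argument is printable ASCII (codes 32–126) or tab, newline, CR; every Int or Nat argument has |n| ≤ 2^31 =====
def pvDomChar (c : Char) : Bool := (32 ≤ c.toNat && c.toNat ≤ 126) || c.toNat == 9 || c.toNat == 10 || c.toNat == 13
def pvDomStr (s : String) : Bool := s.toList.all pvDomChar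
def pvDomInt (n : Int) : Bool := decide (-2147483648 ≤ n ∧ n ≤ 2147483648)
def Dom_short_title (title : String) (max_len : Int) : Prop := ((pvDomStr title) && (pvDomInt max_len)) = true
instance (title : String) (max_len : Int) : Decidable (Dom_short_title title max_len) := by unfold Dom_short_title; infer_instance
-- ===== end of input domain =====

-- B replaces A's word-by-word string growing with an arithmetic count of how many words fit
-- (tracking the running length), then joins that prefix once (objective: alternative decomposition).

-- ===== PORT A =====
def short_title (title : String) (max_len : Int) : String :=
  let words := PySem.Chars.splitOn title.toList [' ']
  let st := (PySem.List.pyRange 0 (words.length : Int) 1).foldl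
      (fun st i =>
        if (PySem.Chars.len st : Int) < max_len
        then PySem.Chars.join [' '] [st, PySem.List.pyGetD words i []]
        else st) ([] : List Char)
  String.ofList (PySem.Chars.strip st)

-- ===== PORT B =====
-- the loop of Source B: count how many leading words fit, carrying cost (sum of lengths) and k
def pvBCount (max_len : Int) : List (List Char) → Int → Nat → Nat
  | [], _, k => k
  | w :: rest, cost, k =>
      if max_len ≤ cost + (k : Int) then k
      else pvBCount max_len rest (cost + (w.length : Int)) (k + 1)

def short_title_alt (title : String) (max_len : Int) : String :=
  let words := PySem.Chars.splitOn title.toList [' ']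
  let k := pvBCount max_len words 0 0
  String.ofList (PySem.Chars.strip (PySem.Chars.join [' '] (words.take k)))

-- ===== PRECONDITION & SPEC =====
def Spec_short_title (title : String) (max_len : Int) (out : String) : Prop := out = short_title_alt title max_len
instance (title : String) (max_len : Int) (out : String) : Decidable (Spec_short_title title max_len out) := by unfold Spec_short_title; infer_instance

-- ===== CLAIM (what is proved, stated in full; the proofs are below) =====
def Claim_equal_short_title : Prop := ∀ (title : String) (max_len : Int), Dom_short_title title max_len → Spec_short_title title max_len (short_title title max_len)

-- ===== LEMMAS AND PROOFS =====

-- proof-side count: number of words A's loop appends, given the current string length c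
def pvKf (max_len : Int) : List (List Char) → Int → Nat
  | [], _ => 0
  | w :: rest, c =>
      if c < max_len then pvKf max_len rest (c + (w.length : Int) + 1) + 1 else 0

lemma pvBCount_eq_kf (max_len : Int) :
    ∀ (ws : List (List Char)) (cost : Int) (k : Nat),
      pvBCount max_len ws cost k = k + pvKf max_len ws (cost + (k : Int)) := by
  intro ws
  induction ws with
  | nil => intro cost k; simp [pvBCount, pvKf]
  | cons w rest ih =>
    intro cost k
    by_cases h : cost + (k : Int) < max_len
    · have h' : ¬ max_len ≤ cost + (k : Int) := by omega
      rw [pvBCount, if_neg h', pvKf, if_pos h, ih]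
      push_cast
      ring_nf
    · have h' : max_len ≤ cost + (k : Int) := by omega
      rw [pvBCount, if_pos h', pvKf, if_neg h]
      omega

-- A's loop body, on plain lists
def pvFA (max_len : Int) (st w : List Char) : List Char :=
  if ((st.length : Nat) : Int) < max_len then st ++ ' ' :: w else st

lemma pvFA_stuck (max_len : Int) :
    ∀ (ws : List (List Char)) (st : List Char), ¬ ((st.length : Int) < max_len) →
      ws.foldl (pvFA max_len) st = st := by
  intro ws
  induction ws with
  | nil => intro st _; rfl
  | cons w rest ih =>
    intro st h
    rw [List.foldl_cons, pvFA, if_neg h, ih st h]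

lemma pvFA_loop (max_len : Int) :
    ∀ (ws : List (List Char)) (st : List Char),
      ws.foldl (pvFA max_len) st =
        st ++ ((ws.take (pvKf max_len ws (st.length : Int))).map (fun w => ' ' :: w)).flatten := by
  intro ws
  induction ws with
  | nil => intro st; simp [pvKf]
  | cons w rest ih =>
    intro st
    by_cases h : (st.length : Int) < max_len
    · rw [pvKf, if_pos h, List.foldl_cons]
      have hb : pvFA max_len st w = st ++ ' ' :: w := by rw [pvFA, if_pos h]
      rw [hb, ih (st ++ ' ' :: w)]
      have hl : ((st ++ ' ' :: w).length : Int) = (st.length : Int) + (w.length : Int) + 1 := by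
        simp
        ring
      rw [hl]
      simp [List.take_succ_cons]
    · rw [pvKf, if_neg h]
      rw [pvFA_stuck max_len (w :: rest) st h]
      simp

lemma pvFlatten_sp (a : List Char) :
    ∀ (l : List (List Char)),
      ((a :: l).map (fun w => ' ' :: w)).flatten = ' ' :: PySem.Chars.join [' '] (a :: l) := by
  intro l
  induction l generalizing a with
  | nil => simp [PySem.Chars.join_singleton]
  | cons b t ih =>
    rw [PySem.Chars.join_cons_cons]
    simp only [List.map_cons, List.flatten_cons] at *
    rw [ih b]
    simp

lemma pvStrip_sp (x : List Char) : PySem.Chars.strip (' ' :: x) = PySem.Chars.strip x := rfl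

lemma pvMain_aux (max_len : Int) (words : List (List Char)) :
    String.ofList (PySem.Chars.strip
      ((PySem.List.pyRange 0 (words.length : Int) 1).foldl
        (fun st i =>
          if (PySem.Chars.len st : Int) < max_len
          then PySem.Chars.join [' '] [st, PySem.List.pyGetD words i []]
          else st) ([] : List Char)))
    = String.ofList (PySem.Chars.strip
        (PySem.Chars.join [' '] (words.take (pvBCount max_len words 0 0)))) := by
  have hfold :
      (PySem.List.pyRange 0 (words.length : Int) 1).foldl
        (fun st i =>
          if (PySem.Chars.len st : Int) < max_len
          then PySem.Chars.join [' '] [st, PySem.List.pyGetD words i []]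
          else st) ([] : List Char)
      = words.foldl (pvFA max_len) [] := by
    rw [PySem.List.foldl_pyRange_zero_pyGetD' words []
      (fun st w => if (PySem.Chars.len st : Int) < max_len
        then PySem.Chars.join [' '] [st, w] else st) []]
    have hf : (fun (st : List Char) (w : List Char) =>
        if (PySem.Chars.len st : Int) < max_len
        then PySem.Chars.join [' '] [st, w] else st) = pvFA max_len := by
      funext st w
      by_cases h : ((st.length : Nat) : Int) < max_len
      · rw [pvFA, if_pos h]
        simp [PySem.Chars.len, if_pos h, PySem.Chars.join_cons_cons,
          PySem.Chars.join_singleton]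
      · rw [pvFA, if_neg h]
        simp [PySem.Chars.len, if_neg h]
    rw [hf]
  rw [hfold, pvFA_loop, pvBCount_eq_kf]
  simp only [List.length_nil, Nat.cast_zero, Int.add_zero, Nat.zero_add, List.nil_append]
  cases htake : words.take (pvKf max_len words 0) with
  | nil => simp
  | cons a l => rw [pvFlatten_sp, pvStrip_sp]

-- ===== VERDICT (by name: the statement is the Claim_ definition above) =====
theorem short_title_spec : Claim_equal_short_title := by
  intro title max_len _
  unfold Spec_short_title short_title short_title_alt
  exact pvMain_aux max_len (PySem.Chars.splitOn title.toList [' '])
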